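-- pv_equiv track=rewrite | github.com/felixrauh/conference_scheduler | src/phase2.py | compute_pairwise_compatibility
-- ===== SOURCE A (Python) =====
-- from typing import Dict, List, Set, Tuple, Optional
--
-- def compute_pairwise_compatibility(
--     tuple1: Tuple[str, ...],
--     tuple2: Tuple[str, ...],
--     preferences: Dict[str, Set[str]]
-- ) -> int:
--     """
--     Compute compatibility score between two tuples.
--
--     Higher score = more compatible (fewer participants attend both).
--     If a participant attends both tuples, putting them in the same block
--     with a gap would cause hopping.
--
--     Returns negative of "conflict count" - pairs with fewer conflicts are better.
--     """
--     conflict = 0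
--     for prefs in preferences.values():
--         attends_1 = any(t in prefs for t in tuple1)
--         attends_2 = any(t in prefs for t in tuple2)
--         if attends_1 and attends_2:
--             conflict += 1
--     return -conflict  # Higher is better (less conflict)
-- ===== SOURCE B (Python) =====
-- def compute_pairwise_compatibility(tuple1, tuple2, preferences):
--     attends1 = {p for p, prefs in preferences.items() if any(t in prefs for t in tuple1)}
--     attends2 = {p for p, prefs in preferences.items() if any(t in prefs for t in tuple2)}
--     return -len(attends1 & attends2)
-- ===== Notes on version B (the rewrite author's own statement) =====
-- stated objective: simpler
-- what changed: Replaces the per-participant counting loop with two attendee-set comprehensions and a set intersection, returning -len(attends1 & attends2).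
import Mathlib
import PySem

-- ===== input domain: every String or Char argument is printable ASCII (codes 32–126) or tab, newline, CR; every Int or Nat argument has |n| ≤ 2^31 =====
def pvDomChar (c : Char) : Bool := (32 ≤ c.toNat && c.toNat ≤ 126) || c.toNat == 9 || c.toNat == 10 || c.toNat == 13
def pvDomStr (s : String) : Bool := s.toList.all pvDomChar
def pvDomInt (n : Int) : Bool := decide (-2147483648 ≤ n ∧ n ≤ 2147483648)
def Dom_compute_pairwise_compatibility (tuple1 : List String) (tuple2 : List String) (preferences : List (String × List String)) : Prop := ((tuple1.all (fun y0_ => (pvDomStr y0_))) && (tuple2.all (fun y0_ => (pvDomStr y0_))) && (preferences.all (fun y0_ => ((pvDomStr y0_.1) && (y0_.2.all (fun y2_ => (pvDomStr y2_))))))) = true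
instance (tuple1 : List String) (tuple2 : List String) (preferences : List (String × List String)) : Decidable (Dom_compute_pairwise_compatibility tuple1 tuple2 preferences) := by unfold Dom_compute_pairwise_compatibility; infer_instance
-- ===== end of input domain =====

-- B replaces A's interleaved per-participant counting loop with two attendee-set
-- comprehensions intersected by set intersection (objective: simpler).

-- ===== PORT A =====
-- 'for prefs in preferences.values(): attends_1 = any(...); attends_2 = any(...); if ... conflict += 1'
def compute_pairwise_compatibility (tuple1 : List String) (tuple2 : List String) (preferences : List (String × List String)) : Int :=
  let conflict : Int := preferences.foldl (fun conflict kv =>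
    let attends_1 := tuple1.any (fun t => kv.2.contains t)
    let attends_2 := tuple2.any (fun t => kv.2.contains t)
    if attends_1 && attends_2 then conflict + 1 else conflict) 0;
  -conflict

-- ===== PORT B =====
-- {p for p, prefs in preferences.items() if any(t in prefs for t in tup)}
def pvAttendees (tup : List String) (preferences : List (String × List String)) : PySem.Set String :=
  PySem.Set.ofList ((preferences.filter (fun kv => tup.any (fun t => kv.2.contains t))).map Prod.fst)

def compute_pairwise_compatibility_alt (tuple1 : List String) (tuple2 : List String) (preferences : List (String × List String)) : Int :=
  -(PySem.Set.len (PySem.Set.inter (pvAttendees tuple1 preferences) (pvAttendees tuple2 preferences)))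

-- ===== PRECONDITION & SPEC =====
-- preferences is a Python dict, so its keys are necessarily distinct.
def Pre_compute_pairwise_compatibility (tuple1 : List String) (tuple2 : List String) (preferences : List (String × List String)) : Prop :=
  (preferences.map Prod.fst).Nodup
instance (tuple1 : List String) (tuple2 : List String) (preferences : List (String × List String)) : Decidable (Pre_compute_pairwise_compatibility tuple1 tuple2 preferences) := by unfold Pre_compute_pairwise_compatibility; infer_instance

def pvWitness_compute_pairwise_compatibility : List String × List String × (List (String × List String)) :=
  (["x", "y"], ["y", "z"], [("ann", ["x", "z"]), ("bob", ["y"])])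

def Spec_compute_pairwise_compatibility (tuple1 : List String) (tuple2 : List String) (preferences : List (String × List String)) (out : Int) : Prop := out = compute_pairwise_compatibility_alt tuple1 tuple2 preferences
instance (tuple1 : List String) (tuple2 : List String) (preferences : List (String × List String)) (out : Int) : Decidable (Spec_compute_pairwise_compatibility tuple1 tuple2 preferences out) := by unfold Spec_compute_pairwise_compatibility; infer_instance

-- ===== CLAIM (what is proved, stated in full; the proofs are below) =====
def Claim_equal_compute_pairwise_compatibility : Prop := ∀ (tuple1 : List String) (tuple2 : List String) (preferences : List (String × List String)), Dom_compute_pairwise_compatibility tuple1 tuple2 preferences → Pre_compute_pairwise_compatibility tuple1 tuple2 preferences → Spec_compute_pairwise_compatibility tuple1 tuple2 preferences (compute_pairwise_compatibility tuple1 tuple2 preferences)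

-- ===== LEMMAS AND PROOFS =====

theorem pv_filter_keys_nodup (p : String × List String → Bool)
    (prefs : List (String × List String)) (h : (prefs.map Prod.fst).Nodup) :
    ((prefs.filter p).map Prod.fst).Nodup :=
  h.sublist (List.Sublist.map Prod.fst List.filter_sublist)

theorem pv_count_lemma (p q : String × List String → Bool) :
    ∀ (prefs : List (String × List String)), (prefs.map Prod.fst).Nodup →
    (((prefs.filter p).map Prod.fst).filter
        (fun k => decide (k ∈ (prefs.filter q).map Prod.fst))).length
      = (prefs.filter (fun kv => p kv && q kv)).length := by
  intro prefs
  induction prefs with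
  | nil => intro _; rfl
  | cons kv rest ih =>
    intro h
    rw [List.map_cons, List.nodup_cons] at h
    obtain ⟨hk, hnd⟩ := h
    have hsub : ∀ (r : String × List String → Bool) {k : String},
        k ∈ (rest.filter r).map Prod.fst → k ∈ rest.map Prod.fst :=
      fun r _ hm => (List.Sublist.map Prod.fst List.filter_sublist).mem hm
    have hk1 : kv.1 ∉ (rest.filter q).map Prod.fst := fun hm => hk (hsub q hm)
    have hcongr :
        ((rest.filter p).map Prod.fst).filter
            (fun k => decide (k = kv.1) || decide (k ∈ (rest.filter q).map Prod.fst))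
        = ((rest.filter p).map Prod.fst).filter
            (fun k => decide (k ∈ (rest.filter q).map Prod.fst)) := by
      apply List.filter_congr
      intro k hkm
      have hne : k ≠ kv.1 := fun he => hk (he ▸ hsub p hkm)
      simp [hne]
    have hMq : (List.filter q (kv :: rest)).map Prod.fst
        = (if q kv = true then kv.1 :: (rest.filter q).map Prod.fst
           else (rest.filter q).map Prod.fst) := by
      rw [List.filter_cons]; split <;> simp
    by_cases hp : p kv = true
    · by_cases hq : q kv = true
      · simp only [hMq, List.filter_cons, hp, hq, if_true, List.map_cons, List.mem_cons,
          List.length_cons, Bool.and_self]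
        simp [hcongr, ih hnd]
      · rw [Bool.not_eq_true] at hq
        simp only [hMq, List.filter_cons, hp, hq, Bool.and_false, Bool.false_eq_true,
          if_true, if_false, List.map_cons]
        rw [if_neg (by simpa using hk1)]
        exact ih hnd
    · rw [Bool.not_eq_true] at hp
      by_cases hq : q kv = true
      · simp only [hMq, List.filter_cons, hp, hq, Bool.false_and, Bool.false_eq_true,
          if_true, if_false, List.map_cons, List.mem_cons]
        simp [hcongr, ih hnd]
      · rw [Bool.not_eq_true] at hq
        simp only [hMq, List.filter_cons, hp, hq, Bool.and_self, Bool.false_eq_true, if_false]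
        exact ih hnd

theorem pv_foldl_count (r : String × List String → Bool) :
    ∀ (prefs : List (String × List String)) (n : Int),
    prefs.foldl (fun c kv => if r kv then c + 1 else c) n
      = n + ((prefs.filter r).length : Int) := by
  intro prefs
  induction prefs with
  | nil => intro n; simp
  | cons kv rest ih =>
    intro n
    by_cases hr : r kv = true <;>
      simp [List.foldl_cons, List.filter_cons, hr, ih] <;> push_cast <;> ring

theorem compute_pairwise_compatibility_spec : Claim_equal_compute_pairwise_compatibility := by
  intro tuple1 tuple2 preferences _ hpre
  unfold Spec_compute_pairwise_compatibility
  unfold compute_pairwise_compatibility compute_pairwise_compatibility_alt pvAttendees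
  set p := fun kv : String × List String => tuple1.any (fun t => kv.2.contains t) with hp
  set q := fun kv : String × List String => tuple2.any (fun t => kv.2.contains t) with hq
  simp only [PySem.Set.ofList_eq_self_of_nodup _ (pv_filter_keys_nodup p preferences hpre),
             PySem.Set.ofList_eq_self_of_nodup _ (pv_filter_keys_nodup q preferences hpre)]
  have hinter : ∀ (s t : List String),
      PySem.Set.len (PySem.Set.inter s t)
      = ((s.filter (fun x => decide (x ∈ t))).length : Int) := by
    intro s t; simp [PySem.Set.inter, PySem.Set.len]
  simp only [hinter, pv_count_lemma p q preferences hpre]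
  have hf := pv_foldl_count (fun kv => p kv && q kv) preferences 0
  simp only [zero_add] at hf
  exact congrArg Neg.neg hf
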